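-- pv_equiv track=rewrite | github.com/Lucas-C/dotfiles_and_notes | languages/python/BlackBoxChallenges/VerticalRaceGame/AutonomousRunner.py | line2digits
-- ===== SOURCE A (Python) =====
-- def line2digits(line):
--     digits = []
--     is_wall = line[0] == '#'
--     count = 1
--     for i in range(1, len(line)):
--         if (is_wall and line[i] == '#') or (not is_wall and line[i] != '#'):  # basically a XOR
--             count += 1
--         else:
--             digits.append(count)
--             is_wall = not is_wall
--             count = 1
--     digits.append(count)
--     return digits
-- ===== SOURCE B (Python) =====
-- def line2digits(line):
--     # Recursive run-splitting: take the maximal prefix with the same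
--     # wall-ness (c == '#') as the first character, record its length,
--     # recurse on the rest.
--     if not line:
--         return []
--     k = line[0] == '#'
--     n = 1
--     while n < len(line) and (line[n] == '#') == k:
--         n += 1
--     return [n] + line2digits(line[n:])
-- ===== Notes on version B (the rewrite author's own statement) =====
-- stated objective: alternative
-- what changed: B replaces A's one-pass explicit state machine (is_wall/count flags updated per index) with recursive run-splitting: peel off the maximal same-wallness prefix, record its length, recurse on the suffix.
import Mathlib
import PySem

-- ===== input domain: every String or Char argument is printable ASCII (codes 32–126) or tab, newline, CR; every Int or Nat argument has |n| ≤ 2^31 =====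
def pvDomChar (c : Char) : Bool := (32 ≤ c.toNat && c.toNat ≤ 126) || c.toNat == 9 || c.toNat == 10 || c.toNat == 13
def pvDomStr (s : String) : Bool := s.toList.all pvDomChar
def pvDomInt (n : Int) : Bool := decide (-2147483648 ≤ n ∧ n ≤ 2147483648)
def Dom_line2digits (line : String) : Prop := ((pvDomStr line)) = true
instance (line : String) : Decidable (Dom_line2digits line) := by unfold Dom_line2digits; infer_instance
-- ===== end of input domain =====

-- B replaces A's one-pass explicit state machine with recursive run-splitting
-- (peel the maximal same-wallness prefix, record its length, recurse).
-- Equivalence is proved for the return value on all non-empty lines.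

-- ===== PORT A =====
-- A's loop over range(1, len(line)) reading line[i] is ported as a fold over
-- the tail of the character list, with the same (digits, is_wall, count) state.
def line2digits (line : String) : List Int :=
  match line.toList with
  | [] => []   -- unreachable under Pre_: Python A raises IndexError on "" (line[0])
  | c :: rest =>
    let st := rest.foldl
      (fun (s : List Int × Bool × Int) ci =>
        if (s.2.1 && (ci == '#')) || (!s.2.1 && !(ci == '#')) then
          (s.1, s.2.1, s.2.2 + 1)
        else
          (s.1 ++ [s.2.2], !s.2.1, 1))
      ([], c == '#', (1 : Int))
    st.1 ++ [st.2.2]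

-- ===== PORT B =====
-- Source B's while loop counts the maximal prefix of the tail whose wall-ness
-- equals the first character's; ported as takeWhile/dropWhile on that predicate.
def line2digitsAltAux : List Char → List Int
  | [] => []
  | c :: rest =>
    let k := c == '#'
    ((1 : Int) + (rest.takeWhile (fun x => (x == '#') == k)).length)
      :: line2digitsAltAux (rest.dropWhile (fun x => (x == '#') == k))
termination_by xs => xs.length
decreasing_by
  have := List.length_dropWhile_le (p := fun x => (x == '#') == (c == '#')) (l := rest)
  simp; omega

def line2digits_alt (line : String) : List Int :=
  line2digitsAltAux line.toList

-- ===== PRECONDITION & SPEC =====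
-- Pre_ excludes only the empty string, on which Python A raises IndexError at line[0].
def Pre_line2digits (line : String) : Prop := line ≠ ""
instance (line : String) : Decidable (Pre_line2digits line) := by unfold Pre_line2digits; infer_instance
def pvWitness_line2digits : String := "##..#"

def Spec_line2digits (line : String) (out : List Int) : Prop := out = line2digits_alt line
instance (line : String) (out : List Int) : Decidable (Spec_line2digits line out) := by unfold Spec_line2digits; infer_instance

-- ===== CLAIM (what is proved, stated in full; the proofs are below) =====
def Claim_equal_line2digits : Prop := ∀ (line : String), Dom_line2digits line → Pre_line2digits line → Spec_line2digits line (line2digits line)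

-- ===== LEMMAS AND PROOFS =====

-- A's loop, started with flag isw, count and accumulator digits, produces the
-- current run's final count followed by B's recursive run-splitting of the rest.
lemma loop_eq_aux (rest : List Char) : ∀ (isw : Bool) (count : Int) (digits : List Int),
    (let st := rest.foldl
      (fun (s : List Int × Bool × Int) ci =>
        if (s.2.1 && (ci == '#')) || (!s.2.1 && !(ci == '#')) then
          (s.1, s.2.1, s.2.2 + 1)
        else
          (s.1 ++ [s.2.2], !s.2.1, 1))
      (digits, isw, count)
     st.1 ++ [st.2.2])
    = digits ++ ((count + ((rest.takeWhile (fun x => (x == '#') == isw)).length : Int))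
        :: line2digitsAltAux (rest.dropWhile (fun x => (x == '#') == isw))) := by
  induction rest with
  | nil => intro isw count digits; simp [line2digitsAltAux]
  | cons c rest ih =>
    intro isw count digits
    simp only [List.foldl_cons, List.takeWhile_cons, List.dropWhile_cons]
    by_cases h : (c == '#') = isw
    · have hcond : (isw && (c == '#') || !isw && !(c == '#')) = true := by
        cases isw <;> simp_all
      rw [hcond, if_pos rfl, h, beq_self_eq_true, if_pos rfl, if_pos rfl, ih]
      simp only [List.length_cons]
      push_cast
      ring_nf
    · have hcond : (isw && (c == '#') || !isw && !(c == '#')) = false := by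
        cases isw <;> simp_all
      have hk : (c == '#') = !isw := by cases isw <;> simp_all
      have hne : ((c == '#') == isw) = false := by simp [h]
      rw [hcond, if_neg (by simp), hne, if_neg (by simp), if_neg (by simp), ih,
        line2digitsAltAux]
      simp [hk]

-- ===== VERDICT (by name: the statement is the Claim_ definition above) =====
theorem line2digits_spec : Claim_equal_line2digits := by
  intro line _ hpre
  unfold Spec_line2digits
  have hne : line.toList ≠ [] := by
    intro h
    exact hpre (by rwa [String.toList_eq_nil_iff] at h)
  cases hl : line.toList with
  | nil => exact absurd hl hne
  | cons c rest =>
    simp only [line2digits, line2digits_alt, hl]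
    rw [loop_eq_aux rest (c == '#') 1 []]
    rw [line2digitsAltAux]
    simp
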